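-- pv_equiv track=rewrite | github.com/kny8493/2025ds | algorithm.py | check_consecutive_teaching_limit
-- ===== SOURCE A (Python) =====
-- def check_consecutive_teaching_limit(teacher_schedule, max_consecutive=3):
--     """
--     교사별 연속 수업 시간이 제한을 초과하는지 확인
--
--     Args:
--         teacher_schedule: 교사 일정
--         max_consecutive: 최대 연속 수업 시간 제한 (기본값: 3)
--
--     Returns:
--         bool: 모든 교사가 제한을 지키면 True, 아니면 False
--     """
--     for teacher, schedule in teacher_schedule.items():
--         for day in schedule:
--             # 연속 수업 시간 계산
--             consecutive = 0
--             max_consecutive_today = 0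
--
--             for period_value in schedule[day]:
--                 if period_value:  # 수업이 있으면
--                     consecutive += 1
--                     max_consecutive_today = max(max_consecutive_today, consecutive)
--                 else:  # 수업이 없으면
--                     consecutive = 0  # 연속 카운트 초기화
--
--             # 제한 초과 확인
--             if max_consecutive_today > max_consecutive:
--                 return False  # 제한 초과
--
--     return True  # 모든 교사가 제한 내
-- ===== SOURCE B (Python) =====
-- def check_consecutive_teaching_limit(teacher_schedule, max_consecutive=3):
--     """Idiomatic rewrite: encode each day's periods as a '1'/'0' bit string,
--     split it on '0' into maximal teaching runs, and require every run length
--     to stay within the limit."""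
--     return all(
--         len(run) <= max_consecutive
--         for schedule in teacher_schedule.values()
--         for periods in schedule.values()
--         for run in ''.join('1' if p else '0' for p in periods).split('0')
--     )
-- ===== Notes on version B (the rewrite author's own statement) =====
-- stated objective: idiomatic
-- what changed: Replaces A's running-counter-and-daily-max bookkeeping (with an explicit dict key iteration plus schedule[day] re-lookup) by encoding each day as a '1'/'0' string, splitting on '0' into maximal teaching runs, and checking every run length with a single all(...) over the values.
import Mathlib
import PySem

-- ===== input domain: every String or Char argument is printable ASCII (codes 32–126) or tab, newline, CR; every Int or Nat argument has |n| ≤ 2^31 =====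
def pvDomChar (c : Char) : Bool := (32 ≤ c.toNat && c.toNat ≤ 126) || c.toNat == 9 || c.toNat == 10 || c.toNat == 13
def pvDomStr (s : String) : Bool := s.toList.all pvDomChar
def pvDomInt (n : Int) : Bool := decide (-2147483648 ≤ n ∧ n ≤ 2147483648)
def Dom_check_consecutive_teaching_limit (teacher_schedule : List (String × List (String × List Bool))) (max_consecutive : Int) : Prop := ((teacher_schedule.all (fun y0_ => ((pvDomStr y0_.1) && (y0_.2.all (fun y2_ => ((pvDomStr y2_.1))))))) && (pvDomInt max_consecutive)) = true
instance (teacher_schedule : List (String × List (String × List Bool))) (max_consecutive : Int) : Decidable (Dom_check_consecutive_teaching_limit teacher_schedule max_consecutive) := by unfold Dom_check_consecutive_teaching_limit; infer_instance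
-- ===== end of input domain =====

-- B encodes each day as a '1'/'0' string and splits it on '0' into maximal teaching runs,
-- checking each run's length — replacing A's running-counter-and-daily-max bookkeeping (idiomatic).

-- ===== PORT A =====
-- the inner per-day loop: running counter `consecutive` and `max_consecutive_today`
def pvA_day (periods : List Bool) : Int :=
  (periods.foldl
    (fun (s : Int × Int) p => if p then (s.1 + 1, max s.2 (s.1 + 1)) else (0, s.2))
    (0, 0)).2

-- `for day in schedule: ... schedule[day] ...` with early `return False`
def pvA_days (schedule : List (String × List Bool)) (days : List (String × List Bool))
    (max_consecutive : Int) : Bool :=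
  match days with
  | [] => true
  | (day, _) :: rest =>
      if pvA_day ((PySem.Dict.get? ⟨schedule⟩ day).getD []) > max_consecutive then false
      else pvA_days schedule rest max_consecutive

def pvA_teachers (ts : List (String × List (String × List Bool))) (max_consecutive : Int) : Bool :=
  match ts with
  | [] => true
  | (_, schedule) :: rest =>
      if pvA_days schedule schedule max_consecutive then pvA_teachers rest max_consecutive
      else false

def check_consecutive_teaching_limit (teacher_schedule : List (String × List (String × List Bool))) (max_consecutive : Int) : Bool :=
  pvA_teachers teacher_schedule max_consecutive

-- ===== PORT B =====
-- ''.join('1' if p else '0' for p in periods).split('0')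
def pvB_runs (periods : List Bool) : List (List Char) :=
  PySem.Chars.splitOn (periods.map (fun p => if p then '1' else '0')) ['0']

def check_consecutive_teaching_limit_alt (teacher_schedule : List (String × List (String × List Bool))) (max_consecutive : Int) : Bool :=
  teacher_schedule.all (fun t =>
    t.2.all (fun d =>
      (pvB_runs d.2).all (fun run => decide ((run.length : Int) ≤ max_consecutive))))

-- ===== PRECONDITION & SPEC =====
-- Pre_ excludes schedules whose association list carries duplicate day keys for one teacher:
-- a Python dict cannot hold them, and A's first-match re-lookup of schedule[day] there is an
-- artefact of the association-list model (B reads each day's value directly).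
def Pre_check_consecutive_teaching_limit (teacher_schedule : List (String × List (String × List Bool))) (max_consecutive : Int) : Prop :=
  ∀ t ∈ teacher_schedule, (t.2.map Prod.fst).Nodup
instance (teacher_schedule : List (String × List (String × List Bool))) (max_consecutive : Int) : Decidable (Pre_check_consecutive_teaching_limit teacher_schedule max_consecutive) := by unfold Pre_check_consecutive_teaching_limit; infer_instance

def pvWitness_check_consecutive_teaching_limit : (List (String × List (String × List Bool))) × Int :=
  ([("kim", [("mon", [true, false, true, true])]), ("lee", [("tue", [])])], 3)

def Spec_check_consecutive_teaching_limit (teacher_schedule : List (String × List (String × List Bool))) (max_consecutive : Int) (out : Bool) : Prop := out = check_consecutive_teaching_limit_alt teacher_schedule max_consecutive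
instance (teacher_schedule : List (String × List (String × List Bool))) (max_consecutive : Int) (out : Bool) : Decidable (Spec_check_consecutive_teaching_limit teacher_schedule max_consecutive out) := by unfold Spec_check_consecutive_teaching_limit; infer_instance

-- ===== CLAIM (what is proved, stated in full; the proofs are below) =====
def Claim_equal_check_consecutive_teaching_limit : Prop := ∀ (teacher_schedule : List (String × List (String × List Bool))) (max_consecutive : Int), Dom_check_consecutive_teaching_limit teacher_schedule max_consecutive → Pre_check_consecutive_teaching_limit teacher_schedule max_consecutive → Spec_check_consecutive_teaching_limit teacher_schedule max_consecutive (check_consecutive_teaching_limit teacher_schedule max_consecutive)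

-- ===== LEMMAS AND PROOFS =====

-- prepend onto the head piece
def pvConsHead (p : List Char) : List (List Char) → List (List Char)
  | [] => [p]
  | x :: xs => (p ++ x) :: xs

-- reference splitter for sep = ['0']
def pvSplit : List Char → List (List Char)
  | [] => [[]]
  | c :: rest => if c = '0' then [] :: pvSplit rest else pvConsHead [c] (pvSplit rest)

lemma pvSplit_ne_nil (l : List Char) : pvSplit l ≠ [] := by
  cases l with
  | nil => simp [pvSplit]
  | cons c rest =>
      simp only [pvSplit]
      split
      · simp
      · cases h : pvSplit rest <;> simp [pvConsHead]

lemma pvConsHead_consHead (p q : List Char) (m : List (List Char)) (hm : m ≠ []) :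
    pvConsHead p (pvConsHead q m) = pvConsHead (p ++ q) m := by
  cases m with
  | nil => exact absurd rfl hm
  | cons x xs => simp [pvConsHead]

lemma pvConsHead_nil (m : List (List Char)) (hm : m ≠ []) : pvConsHead [] m = m := by
  cases m with
  | nil => exact absurd rfl hm
  | cons x xs => simp [pvConsHead]

lemma pvGo_spec (fuel : Nat) (l cur : List Char) (acc : List (List Char))
    (h : l.length ≤ fuel) :
    PySem.Chars.splitOn.go ['0'] fuel l cur acc
      = acc.reverse ++ pvConsHead cur.reverse (pvSplit l) := by
  induction fuel generalizing l cur acc with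
  | zero =>
      have : l = [] := List.eq_nil_of_length_eq_zero (Nat.le_zero.mp h)
      subst this
      simp [PySem.Chars.splitOn.go, pvSplit, pvConsHead]
  | succ n ih =>
      cases l with
      | nil => simp [PySem.Chars.splitOn.go, pvSplit, pvConsHead]
      | cons c rest =>
          simp only [PySem.Chars.splitOn.go]
          by_cases hc : c = '0'
          · subst hc
            simp only [List.isPrefixOf, List.isPrefixOf_nil_left]
            rw [if_pos (by simp)]
            rw [ih _ _ _ (by simpa using Nat.le_of_succ_le_succ h)]
            have hps : pvSplit ('0' :: rest) = [] :: pvSplit rest := by simp [pvSplit]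
            rw [hps]
            simp only [List.reverse_nil, List.reverse_cons]
            rw [show List.drop (['0'] : List Char).length ('0' :: rest) = rest from rfl]
            rw [pvConsHead_nil _ (pvSplit_ne_nil rest)]
            simp [pvConsHead]
          · rw [if_neg (by simp [List.isPrefixOf]; intro h'; exact hc h'.symm)]
            rw [ih _ _ _ (by simpa using Nat.le_of_succ_le_succ h)]
            rw [pvSplit]
            rw [if_neg hc]
            rw [pvConsHead_consHead _ _ _ (pvSplit_ne_nil rest)]
            simp

lemma splitOn_eq_pvSplit (s : List Char) :
    PySem.Chars.splitOn s ['0'] = pvSplit s := by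
  show PySem.Chars.splitOn.go ['0'] (s.length + 1) s [] [] = _
  rw [pvGo_spec _ _ _ _ (Nat.le_succ _)]
  cases h : pvSplit s with
  | nil => exact absurd h (pvSplit_ne_nil s)
  | cons x xs => simp [pvConsHead]

-- lengths of the pieces, computed directly on the Bool list
def pvPL : List Bool → List Nat
  | [] => [0]
  | false :: r => 0 :: pvPL r
  | true :: r =>
      match pvPL r with
      | [] => [1]
      | n :: ns => (n + 1) :: ns

lemma pvPL_ne_nil (l : List Bool) : pvPL l ≠ [] := by
  cases l with
  | nil => simp [pvPL]
  | cons b r =>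
      cases b
      · simp [pvPL]
      · simp only [pvPL]
        cases h : pvPL r <;> simp

lemma pvSplit_map_length (l : List Bool) :
    (pvSplit (l.map (fun p => if p then '1' else '0'))).map List.length = pvPL l := by
  induction l with
  | nil => simp [pvSplit, pvPL]
  | cons b r ih =>
      cases b with
      | false => simp [pvSplit, pvPL, ih]
      | true =>
          simp only [List.map_cons, if_true, pvSplit, pvPL]
          rw [if_neg (by decide)]
          cases h : pvSplit (r.map (fun p => if p then '1' else '0')) with
          | nil => exact absurd h (pvSplit_ne_nil _)
          | cons x xs =>
              rw [h] at ih
              cases hp : pvPL r with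
              | nil => exact absurd hp (pvPL_ne_nil r)
              | cons n ns =>
                  rw [hp] at ih
                  simp only [List.map_cons, List.cons.injEq] at ih
                  simp [pvConsHead, ih.1, ih.2]

-- invariant for A's inner foldl
lemma pvA_day_inv (l : List Bool) (c m : Int) (hc : 0 ≤ c) (hcm : c ≤ m) :
    (l.foldl (fun (s : Int × Int) p => if p then (s.1 + 1, max s.2 (s.1 + 1)) else (0, s.2))
      (c, m)).2
    = max m (max (c + ((pvPL l).headI : Int))
        (((pvPL l).tail.foldr max 0 : Nat) : Int)) := by
  induction l generalizing c m with
  | nil => simp [pvPL]; omega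
  | cons b r ih =>
      cases b with
      | false =>
          simp only [List.foldl_cons, if_false, Bool.false_eq_true, ite_false, pvPL]
          rw [ih 0 m le_rfl (le_trans hc hcm)]
          cases hp : pvPL r with
          | nil => exact absurd hp (pvPL_ne_nil r)
          | cons n ns =>
              simp only [List.headI, List.tail_cons, List.foldr]
              push_cast
              omega
      | true =>
          simp only [List.foldl_cons, ite_true, pvPL]
          rw [ih (c + 1) (max m (c + 1)) (by omega) (le_max_right _ _)]
          cases hp : pvPL r with
          | nil => exact absurd hp (pvPL_ne_nil r)
          | cons n ns =>
              simp only [List.headI, List.tail_cons]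
              push_cast
              omega

lemma pvA_day_eq (l : List Bool) :
    pvA_day l = ((pvPL l).foldr max 0 : Nat) := by
  unfold pvA_day
  rw [pvA_day_inv l 0 0 le_rfl le_rfl]
  cases hp : pvPL l with
  | nil => exact absurd hp (pvPL_ne_nil l)
  | cons n ns =>
      simp only [List.headI, List.tail_cons, List.foldr]
      push_cast
      omega

lemma pvMem_le_foldr (xs : List Nat) (n : Nat) (hn : n ∈ xs) : n ≤ xs.foldr max 0 := by
  induction xs with
  | nil => cases hn
  | cons x r ih =>
      rcases List.mem_cons.mp hn with rfl | h
      · exact le_max_left _ _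
      · exact le_trans (ih h) (le_max_right _ _)

lemma pvFoldr_le (xs : List Nat) (mc : Int) (h0 : 0 ≤ mc)
    (h : ∀ n ∈ xs, (n : Int) ≤ mc) : ((xs.foldr max 0 : Nat) : Int) ≤ mc := by
  induction xs with
  | nil => simpa using h0
  | cons x r ih =>
      have hx := h x (by simp)
      have hr := ih (fun n hn => h n (by simp [hn]))
      simp only [List.foldr]
      push_cast
      omega

-- the per-day boolean agreement
lemma pvDay_agree (l : List Bool) (mc : Int) :
    (!decide (pvA_day l > mc)) = (pvB_runs l).all (fun run => decide ((run.length : Int) ≤ mc)) := by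
  rw [pvA_day_eq]
  unfold pvB_runs
  rw [splitOn_eq_pvSplit]
  have hall : (pvSplit (l.map (fun p => if p then '1' else '0'))).all
        (fun run => decide ((run.length : Int) ≤ mc))
      = (pvPL l).all (fun n => decide ((n : Int) ≤ mc)) := by
    rw [← pvSplit_map_length l, List.all_map]
    rfl
  rw [hall]
  rcases le_or_gt (((pvPL l).foldr max 0 : Nat) : Int) mc with h | h
  · simp only [gt_iff_lt, not_lt.mpr h, decide_false, Bool.not_false]
    symm
    rw [List.all_eq_true]
    intro n hn
    have hle : (n : Nat) ≤ (pvPL l).foldr max 0 := pvMem_le_foldr _ _ hn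
    simp only [decide_eq_true_eq]
    calc ((n : Nat) : Int) ≤ (((pvPL l).foldr max 0 : Nat) : Int) := by exact_mod_cast hle
      _ ≤ mc := h
  · simp only [gt_iff_lt, h, decide_true, Bool.not_true]
    symm
    rw [List.all_eq_false]
    by_cases h0 : 0 ≤ mc
    · by_contra hno
      push_neg at hno
      have hall' : ∀ n ∈ pvPL l, (n : Int) ≤ mc := by
        intro n hn
        have := hno n hn
        simpa using this
      exact absurd (pvFoldr_le _ _ h0 hall') (by omega)
    · cases hp : pvPL l with
      | nil => exact absurd hp (pvPL_ne_nil l)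
      | cons n ns =>
          refine ⟨n, by simp, fun hdec => ?_⟩
          have hle := of_decide_eq_true hdec
          have hn0 : (0:Int) ≤ (n:Int) := by positivity
          omega

-- first-match lookup returns the paired value under nodup keys
lemma pvGet_of_mem (schedule : List (String × List Bool)) (day : String) (v : List Bool)
    (hnd : (schedule.map Prod.fst).Nodup) (hm : (day, v) ∈ schedule) :
    PySem.Dict.get? ⟨schedule⟩ day = some v := by
  induction schedule with
  | nil => cases hm
  | cons x xs ih =>
      simp only [List.map_cons, List.nodup_cons] at hnd
      rcases List.mem_cons.mp hm with rfl | hm'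
      · simp [PySem.Dict.get?, PySem.Dict.items, List.find?]
      · have hne : x.1 ≠ day := by
          intro he
          exact hnd.1 (he ▸ List.mem_map.mpr ⟨(day, v), hm', rfl⟩)
        have := ih hnd.2 hm'
        simp only [PySem.Dict.get?] at this ⊢
        rw [List.find?_cons_of_neg (by simp [hne])]
        exact this

lemma pvDays_eq (schedule : List (String × List Bool)) (days : List (String × List Bool))
    (mc : Int) (hnd : (schedule.map Prod.fst).Nodup) (hsub : ∀ x ∈ days, x ∈ schedule) :
    pvA_days schedule days mc
      = days.all (fun d => (pvB_runs d.2).all (fun run => decide ((run.length : Int) ≤ mc))) := by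
  induction days with
  | nil => rfl
  | cons d rest ih =>
      obtain ⟨day, v⟩ := d
      have hget := pvGet_of_mem schedule day v hnd (hsub _ (by simp))
      simp only [pvA_days, hget, Option.getD_some, List.all_cons]
      have hday := pvDay_agree v mc
      by_cases h : pvA_day v > mc
      · rw [if_pos h]
        rw [← hday]
        simp [h]
      · rw [if_neg h]
        rw [ih (fun x hx => hsub x (by simp [hx]))]
        rw [← hday]
        simp [h]

lemma pvTeachers_eq (ts : List (String × List (String × List Bool))) (mc : Int)
    (hnd : ∀ t ∈ ts, (t.2.map Prod.fst).Nodup) :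
    pvA_teachers ts mc = check_consecutive_teaching_limit_alt ts mc := by
  induction ts with
  | nil => rfl
  | cons t rest ih =>
      simp only [pvA_teachers, check_consecutive_teaching_limit_alt, List.all_cons]
      rw [pvDays_eq t.2 t.2 mc (hnd t (by simp)) (fun x hx => hx)]
      rw [show check_consecutive_teaching_limit_alt rest mc
            = rest.all (fun t => t.2.all (fun d =>
                (pvB_runs d.2).all (fun run => decide ((run.length : Int) ≤ mc)))) from rfl] at ih
      rw [← ih (fun t ht => hnd t (by simp [ht]))]
      by_cases h : pvA_days t.2 t.2 mc = true
      · rw [pvDays_eq t.2 t.2 mc (hnd t (by simp)) (fun x hx => hx)] at h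
        simp [h]
      · rw [pvDays_eq t.2 t.2 mc (hnd t (by simp)) (fun x hx => hx)] at h
        simp [h]

-- ===== VERDICT (by name: the statement is the Claim_ definition above) =====
theorem check_consecutive_teaching_limit_spec : Claim_equal_check_consecutive_teaching_limit := by
  intro ts mc _ hpre
  unfold Spec_check_consecutive_teaching_limit check_consecutive_teaching_limit
  exact pvTeachers_eq ts mc hpre
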